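-- pv_equiv track=rewrite | github.com/ailend0324/cursor-project | smart_service_agent/scripts/intent_analysis/extract_faq.py | organize_faq_by_intent
-- ===== SOURCE A (Python) =====
-- from collections import defaultdict
--
-- def organize_faq_by_intent(faq_items):
--     """
--     按意图组织FAQ
--
--     参数:
--         faq_items: FAQ列表
--
--     返回:
--         dict: 按意图组织的FAQ
--     """
--     organized_faq = defaultdict(list)
--
--     for item in faq_items:
--         intent_category = item.get('intent_category', '未知')
--         intent_subcategory = item.get('intent_subcategory', '未知')
--
--         # 使用意图类别和子类别作为键
--         key = f"{intent_category} / {intent_subcategory}"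
--         organized_faq[key].append(item)
--
--     # 转换为普通字典
--     return dict(organized_faq)
-- ===== SOURCE B (Python) =====
-- def organize_faq_by_intent(faq_items):
--     """Group FAQ items by intent key: two passes (ordered distinct keys, then a
--     filter per key) instead of single-pass defaultdict accumulation."""
--     def key(item):
--         return f"{item.get('intent_category', '未知')} / {item.get('intent_subcategory', '未知')}"
--     keys = list(dict.fromkeys(key(item) for item in faq_items))
--     return {k: [item for item in faq_items if key(item) == k] for k in keys}
-- ===== Notes on version B (the rewrite author's own statement) =====
-- stated objective: alternative
-- what changed: Replaced the single-pass defaultdict accumulation with a two-phase group-by: first collect the distinct intent keys in first-occurrence order (dict.fromkeys), then build each group with one filter pass over the items per key.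
import Mathlib
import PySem

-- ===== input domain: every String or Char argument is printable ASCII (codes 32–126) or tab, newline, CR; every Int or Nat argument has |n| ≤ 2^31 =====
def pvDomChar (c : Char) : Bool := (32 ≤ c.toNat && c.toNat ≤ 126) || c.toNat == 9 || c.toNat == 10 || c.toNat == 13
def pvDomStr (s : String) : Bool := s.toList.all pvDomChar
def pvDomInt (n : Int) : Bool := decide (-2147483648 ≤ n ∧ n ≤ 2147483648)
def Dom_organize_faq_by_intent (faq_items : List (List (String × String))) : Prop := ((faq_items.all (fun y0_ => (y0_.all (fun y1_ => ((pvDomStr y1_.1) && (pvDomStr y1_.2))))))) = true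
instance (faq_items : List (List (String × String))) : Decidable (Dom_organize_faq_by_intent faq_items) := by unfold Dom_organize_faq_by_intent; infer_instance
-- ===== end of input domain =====

-- B replaces A's single-pass defaultdict accumulation by a two-phase group-by
-- (ordered distinct keys, then one filter per key); alternative decomposition, not faster.

-- the composite key f"{item.get('intent_category','未知')} / {item.get('intent_subcategory','未知')}"
-- (both Pythons compute this same expression; item.get = first-match assoc lookup via PySem.Dict)
def pvKey (item : List (String × String)) : String :=
  (PySem.Dict.mk item).getD "intent_category" "未知" ++ " / " ++
    (PySem.Dict.mk item).getD "intent_subcategory" "未知"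

-- ===== PORT A =====
-- for item in faq_items: organized_faq[key].append(item); return dict(organized_faq)
def organize_faq_by_intent (faq_items : List (List (String × String))) : List (String × List (List (String × String))) :=
  (faq_items.foldl
    (fun d item => d.modify (pvKey item) [] (· ++ [item]))
    (PySem.Dict.empty : PySem.Dict String (List (List (String × String))))).items

-- ===== PORT B =====
def organize_faq_by_intent_alt (faq_items : List (List (String × String))) : List (String × List (List (String × String))) :=
  (PySem.List.dedup (faq_items.map pvKey)).map
    (fun k => (k, faq_items.filter (fun item => pvKey item == k)))

-- ===== PRECONDITION & SPEC =====
def Spec_organize_faq_by_intent (faq_items : List (List (String × String))) (out : List (String × List (List (String × String)))) : Prop := out = organize_faq_by_intent_alt faq_items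
instance (faq_items : List (List (String × String))) (out : List (String × List (List (String × String)))) : Decidable (Spec_organize_faq_by_intent faq_items out) := by unfold Spec_organize_faq_by_intent; infer_instance

-- ===== CLAIM (what is proved, stated in full; the proofs are below) =====
def Claim_equal_organize_faq_by_intent : Prop := ∀ (faq_items : List (List (String × String))), Dom_organize_faq_by_intent faq_items → Spec_organize_faq_by_intent faq_items (organize_faq_by_intent faq_items)

-- ===== LEMMAS AND PROOFS =====

-- A's accumulated dict, named for the lemmas below
def pvDictA (faq_items : List (List (String × String))) : PySem.Dict String (List (List (String × String))) :=
  faq_items.foldl (fun d item => d.modify (pvKey item) [] (· ++ [item])) PySem.Dict.empty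

theorem pvDictA_keys (faq_items : List (List (String × String))) :
    (pvDictA faq_items).keys = PySem.List.dedup (faq_items.map pvKey) := by
  unfold pvDictA
  rw [PySem.Dict.keys_foldl_modify_key]
  rw [PySem.List.dedup, PySem.Set.ofList_eq_foldl, List.foldl_map]
  simp only [PySem.Dict.keys_empty, PySem.Set.update, List.foldl_map]

theorem pvDictA_keys_nodup (faq_items : List (List (String × String))) :
    (pvDictA faq_items).keys.Nodup := by
  unfold pvDictA
  exact PySem.Dict.nodup_keys_foldl_modify_key faq_items pvKey []
    (fun d item => (· ++ [item])) PySem.Dict.empty (by simp [pysem])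

theorem pvDictA_getD (faq_items : List (List (String × String))) (k : String) :
    (pvDictA faq_items).getD k [] = faq_items.filter (fun item => pvKey item == k) := by
  unfold pvDictA
  have h := PySem.Dict.getD_foldl_modify_append
    (l := faq_items.map (fun item => (pvKey item, item)))
    (d := (PySem.Dict.empty : PySem.Dict String (List (List (String × String))))) (c := k)
  rw [List.foldl_map] at h
  simp only [h, PySem.Dict.getD_empty, List.nil_append, List.filter_map]
  simp [Function.comp_def]

theorem organize_faq_by_intent_eq_alt (faq_items : List (List (String × String))) :
    organize_faq_by_intent faq_items = organize_faq_by_intent_alt faq_items := by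
  show (pvDictA faq_items).items = _
  rw [PySem.Dict.items_eq_map_keys (pvDictA faq_items) (pvDictA_keys_nodup faq_items) []]
  rw [pvDictA_keys]
  unfold organize_faq_by_intent_alt
  exact List.map_congr_left (fun k _ => by rw [pvDictA_getD])

-- ===== VERDICT (by name: the statement is the Claim_ definition above) =====
theorem organize_faq_by_intent_spec : Claim_equal_organize_faq_by_intent := by
  intro faq_items _
  unfold Spec_organize_faq_by_intent
  exact organize_faq_by_intent_eq_alt faq_items
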